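-- pv_equiv track=rewrite | github.com/BlackBadgeMedia/Elaine | main.py | find_subject_placement_priority
-- ===== SOURCE A (Python) =====
-- def find_subject_placement_priority (num_of_students_in_subjects: dict, subjects: tuple) -> list:
--     """
--     Finds out which subjects the program should place in the timetable first. \n
--     This is to speed up the algortithm. \n
--     Returns a list with the order in which the program should place subjects.
--     """
--     subject_placement_priority = []
--
--     # places subject priority based on frequency
--     for i in dict(sorted(num_of_students_in_subjects.items(), key = lambda x:x[1], reverse = True)):
--         subject_placement_priority.append(i)
--
--
--     """
--     subjects_with_2_periods = []
--     # finds out which subjects need two periods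
--     for subject in subjects:
--         if subject.multiple_periods:
--             subjects_with_2_periods.append(subject.ID)
--
--     # moves all subjects that need 2 periods to the front of the priority
--     for target_value in subjects_with_2_periods:
--         subject_placement_priority.remove(target_value)
--         subject_placement_priority.insert(0, target_value)
--     """
--
--     return subject_placement_priority
-- ===== SOURCE B (Python) =====
-- def find_subject_placement_priority(num_of_students_in_subjects: dict, subjects: tuple) -> list:
--     """Bucket subjects by their student count, then emit the buckets in
--     descending count order (per-bucket order = dict iteration order, which
--     reproduces the stability of Python's sort)."""
--     buckets = {}
--     for name, count in num_of_students_in_subjects.items():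
--         buckets.setdefault(count, []).append(name)
--     priority = []
--     for count in sorted(buckets, reverse=True):
--         priority.extend(buckets[count])
--     return priority
-- ===== Notes on version B (the rewrite author's own statement) =====
-- stated objective: alternative
-- what changed: Replaces sort-all-items-then-rebuild-a-dict with a single grouping pass into count-keyed buckets followed by sorting only the distinct counts and concatenating the buckets in descending order.
import Mathlib
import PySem

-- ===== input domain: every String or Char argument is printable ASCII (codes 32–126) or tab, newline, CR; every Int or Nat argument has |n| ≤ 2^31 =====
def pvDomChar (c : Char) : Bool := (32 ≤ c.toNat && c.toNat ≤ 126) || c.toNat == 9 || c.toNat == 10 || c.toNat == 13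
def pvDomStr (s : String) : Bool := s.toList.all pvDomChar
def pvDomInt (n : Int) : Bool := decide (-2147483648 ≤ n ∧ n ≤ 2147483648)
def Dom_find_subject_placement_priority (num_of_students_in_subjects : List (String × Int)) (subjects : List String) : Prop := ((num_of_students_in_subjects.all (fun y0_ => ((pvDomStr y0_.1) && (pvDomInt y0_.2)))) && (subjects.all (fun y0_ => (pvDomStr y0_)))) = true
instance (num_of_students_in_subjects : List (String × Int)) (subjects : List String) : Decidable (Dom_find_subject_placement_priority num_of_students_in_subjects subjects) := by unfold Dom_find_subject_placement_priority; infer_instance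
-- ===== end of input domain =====

-- B replaces "sort all items, rebuild a dict, read its keys" by one grouping pass into
-- count-keyed buckets plus a sort of the distinct counts only (objective: alternative).


-- ===== PORT A =====
-- for i in dict(sorted(d.items(), key=lambda x: x[1], reverse=True)): out.append(i)
def find_subject_placement_priority (num_of_students_in_subjects : List (String × Int)) (subjects : List String) : List String :=
  let sorted_items := PySem.List.sorted num_of_students_in_subjects (fun x => x.2) true
  let rebuilt := PySem.Dict.ofList sorted_items
  rebuilt.keys.foldl (fun acc i => acc ++ [i]) []

-- ===== PORT B =====
-- one grouping pass into count-keyed buckets, then the distinct counts sorted descending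
def find_subject_placement_priority_alt (num_of_students_in_subjects : List (String × Int)) (subjects : List String) : List String :=
  let buckets := num_of_students_in_subjects.foldl
    (fun d p => d.modify p.2 ([] : List String) (fun xs => xs ++ [p.1])) PySem.Dict.empty
  let counts := PySem.List.sorted buckets.keys (fun c => c) true
  counts.foldl (fun acc c => acc ++ buckets.getD c []) []

-- ===== PRECONDITION & SPEC =====
-- Pre_ excludes association lists with a duplicated subject key: such a list does not
-- represent any Python dict (A's declared input type), so no behaviour of A exists there.
def Pre_find_subject_placement_priority (num_of_students_in_subjects : List (String × Int)) (subjects : List String) : Prop :=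
  (num_of_students_in_subjects.map Prod.fst).Nodup
instance (num_of_students_in_subjects : List (String × Int)) (subjects : List String) : Decidable (Pre_find_subject_placement_priority num_of_students_in_subjects subjects) := by unfold Pre_find_subject_placement_priority; infer_instance
def pvWitness_find_subject_placement_priority : (List (String × Int)) × List String :=
  ([("maths", 30), ("art", 12), ("music", 12)], ["maths", "art", "music"])

def Spec_find_subject_placement_priority (num_of_students_in_subjects : List (String × Int)) (subjects : List String) (out : List String) : Prop := out = find_subject_placement_priority_alt num_of_students_in_subjects subjects
instance (num_of_students_in_subjects : List (String × Int)) (subjects : List String) (out : List String) : Decidable (Spec_find_subject_placement_priority num_of_students_in_subjects subjects out) := by unfold Spec_find_subject_placement_priority; infer_instance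

-- ===== CLAIM (what is proved, stated in full; the proofs are below) =====
def Claim_equal_find_subject_placement_priority : Prop := ∀ (num_of_students_in_subjects : List (String × Int)) (subjects : List String), Dom_find_subject_placement_priority num_of_students_in_subjects subjects → Pre_find_subject_placement_priority num_of_students_in_subjects subjects → Spec_find_subject_placement_priority num_of_students_in_subjects subjects (find_subject_placement_priority num_of_students_in_subjects subjects)

-- ===== LEMMAS AND PROOFS =====

-- appending one element to the sorted input performs one insertBy step
theorem sorted_rev_concat {α : Type} (key : α → Int) (t : List α) (x : α) :
    PySem.List.sorted (t ++ [x]) key true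
      = PySem.List.insertBy (fun a b => decide (key b < key a)) x (PySem.List.sorted t key true) := by
  rw [PySem.List.sorted_rev_eq_foldl_insertBy, PySem.List.sorted_rev_eq_foldl_insertBy,
    List.foldl_append]
  rfl

theorem insertBy_of_forall_before {α : Type} (before : α → α → Bool) (x : α) (ys : List α)
    (h : ∀ y ∈ ys, before x y = true) :
    PySem.List.insertBy before x ys = x :: ys := by
  cases ys with
  | nil => rfl
  | cons y ys => simp [PySem.List.insertBy, h y (by simp)]

theorem insertBy_append_of_forall_not_before {α : Type} (before : α → α → Bool) (x : α)
    (zs ys : List α) (h : ∀ z ∈ zs, before x z = false) :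
    PySem.List.insertBy before x (zs ++ ys) = zs ++ PySem.List.insertBy before x ys := by
  induction zs with
  | nil => rfl
  | cons z zs ih =>
      simp only [List.cons_append, PySem.List.insertBy, h z (by simp)]
      simp only [Bool.false_eq_true, if_false]
      rw [ih (fun z hz => h z (by simp [hz]))]

-- inserting x into a descending bucket concatenation whose key is already a bucket key
theorem insertBy_flatMap_mem {α : Type} (key : α → Int) (x : α) (f : Int → List α)
    (hf : ∀ c, ∀ p ∈ f c, key p = c) :
    ∀ (D : List Int), D.Pairwise (· > ·) → key x ∈ D →
      PySem.List.insertBy (fun a b => decide (key b < key a)) x (D.flatMap f)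
        = D.flatMap (fun c => f c ++ if key x == c then [x] else []) := by
  intro D
  induction D with
  | nil => intro _ h; simp at h
  | cons c D ih =>
      intro hpw hmem
      have hgt : ∀ b ∈ D, b < c := fun b hb => (List.pairwise_cons.mp hpw).1 b hb
      simp only [List.flatMap_cons]
      by_cases hck : key x = c
      · -- x belongs to the bucket of c: pass through f c, then insert in front of the rest
        rw [insertBy_append_of_forall_not_before _ _ _ _
            (fun z hz => by simp [hf c z hz, hck])]
        rw [insertBy_of_forall_before _ _ _ (fun y hy => by
          rcases List.mem_flatMap.mp hy with ⟨c', hc', hy'⟩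
          simp [hf c' y hy', hck, hgt c' hc'])]
        simp only [hck, List.append_assoc]
        rw [List.append_cancel_left_eq]
        have hx : ((c == c)) = true := by simp
        simp only [hx, if_pos]
        rw [List.singleton_append, List.cons.injEq]
        refine ⟨rfl, ?_⟩
        exact (List.flatMap_congr (fun c' hc' => by
          have hne : c ≠ c' := by have := hgt c' hc'; omega
          simp [hne])).symm
      · -- c ≠ key x: A's element passes the whole bucket of c and recurses
        have hmem' : key x ∈ D := by
          rcases List.mem_cons.mp hmem with h | h
          · exact absurd h hck
          · exact h
        have hlt : key x < c := hgt _ hmem'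
        rw [insertBy_append_of_forall_not_before _ _ _ _
            (fun z hz => by simp [hf c z hz]; omega)]
        rw [ih (List.pairwise_cons.mp hpw).2 hmem']
        simp [hck]

-- inserting x whose key is fresh: a new singleton bucket appears at the right position
theorem insertBy_flatMap_not_mem {α : Type} (key : α → Int) (x : α) (f : Int → List α)
    (hf : ∀ c, ∀ p ∈ f c, key p = c) (hf0 : f (key x) = []) :
    ∀ (D : List Int), D.Pairwise (· > ·) → key x ∉ D →
      PySem.List.insertBy (fun a b => decide (key b < key a)) x (D.flatMap f)
        = (PySem.List.insertBy (fun a b => decide (b < a)) (key x) D).flatMap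
            (fun c => f c ++ if key x == c then [x] else []) := by
  intro D
  induction D with
  | nil => simp [PySem.List.insertBy, hf0]
  | cons c D ih =>
      intro hpw hmem
      have hgt : ∀ b ∈ D, b < c := fun b hb => (List.pairwise_cons.mp hpw).1 b hb
      have hck : key x ≠ c := fun h => hmem (by simp [h])
      simp only [List.flatMap_cons]
      by_cases hlt : c < key x
      · -- the new bucket goes in front of everything
        rw [insertBy_of_forall_before _ _ _ (fun y hy => by
          rcases List.mem_append.mp hy with hy | hy
          · simp [hf c y hy, hlt]
          · rcases List.mem_flatMap.mp hy with ⟨c', hc', hy'⟩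
            have := hgt c' hc'
            simp [hf c' y hy']; omega)]
        have hins : PySem.List.insertBy (fun a b => decide (b < a)) (key x) (c :: D)
            = key x :: c :: D := by simp [PySem.List.insertBy, hlt]
        rw [hins]
        simp only [List.flatMap_cons, hf0, List.nil_append, beq_self_eq_true, if_pos]
        have hc : ((key x == c)) = false := by simp [hck]
        simp only [hc, Bool.false_eq_true, if_false, List.append_nil, List.singleton_append]
        rw [List.cons.injEq]
        refine ⟨rfl, ?_⟩
        rw [List.append_cancel_left_eq]
        exact (List.flatMap_congr (fun c' hc' => by
          have hne : key x ≠ c' := by have := hgt c' hc'; omega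
          simp [hne])).symm
      · -- key x < c: pass the bucket of c and recurse
        have hlt' : key x < c := by
          rcases lt_or_gt_of_ne hck with h | h
          · exact h
          · exact absurd h hlt
        rw [insertBy_append_of_forall_not_before _ _ _ _
            (fun z hz => by simp [hf c z hz]; omega)]
        rw [ih (List.pairwise_cons.mp hpw).2 (fun h => hmem (by simp [h]))]
        have hins : PySem.List.insertBy (fun a b => decide (b < a)) (key x) (c :: D)
            = c :: PySem.List.insertBy (fun a b => decide (b < a)) (key x) D := by
          simp [PySem.List.insertBy]; omega
        rw [hins]
        simp [hck]

-- the distinct keys of xs, sorted descending, are strictly decreasing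
theorem sorted_rev_ofList_pairwise_gt (xs : List Int) :
    (PySem.List.sorted (PySem.Set.ofList xs) (fun c => c) true).Pairwise (· > ·) := by
  have hnd : (PySem.List.sorted (PySem.Set.ofList xs) (fun c => c) true).Nodup :=
    ((PySem.List.sorted_perm (PySem.Set.ofList xs) (fun c => c) true)).symm.nodup
      (PySem.Set.nodup_ofList xs)
  have hle := PySem.List.sorted_pairwise_rev (PySem.Set.ofList xs) (fun c => c)
  exact (hle.and hnd).imp (fun h => lt_of_le_of_ne h.1 (Ne.symm h.2))

theorem mem_sorted_rev_ofList (xs : List Int) (c : Int) :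
    c ∈ PySem.List.sorted (PySem.Set.ofList xs) (fun c => c) true ↔ c ∈ xs := by
  rw [PySem.List.mem_sorted, PySem.Set.mem_ofList]

-- MAIN GROUPING LEMMA: the stable descending sort is the concatenation of the
-- per-key buckets taken in descending order of the distinct keys.
theorem sorted_rev_eq_flatMap_buckets {α : Type} (key : α → Int) (l : List α) :
    PySem.List.sorted l key true
      = (PySem.List.sorted (PySem.Set.ofList (l.map key)) (fun c => c) true).flatMap
          (fun c => l.filter (fun p => key p == c)) := by
  induction l using List.reverseRecOn with
  | nil => rfl
  | append_singleton t x ih =>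
      have hofl : PySem.Set.ofList ((t ++ [x]).map key)
          = PySem.Set.add (PySem.Set.ofList (t.map key)) (key x) := by
        simp [PySem.Set.ofList, List.foldl_append]
      have hbuckets : ∀ c : Int, (t ++ [x]).filter (fun p => key p == c)
          = t.filter (fun p => key p == c) ++ (if key x == c then [x] else []) := by
        intro c
        rw [List.filter_append, List.filter_singleton]
        by_cases h : key x = c <;> simp [Bool.cond_eq_ite, h]
      have hf : ∀ c : Int, ∀ p ∈ t.filter (fun p => key p == c), key p = c := by
        intro c p hp
        exact by simpa using (List.mem_filter.mp hp).2
      rw [sorted_rev_concat, ih]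
      by_cases hk : key x ∈ PySem.Set.ofList (t.map key)
      · have hadd : PySem.Set.add (PySem.Set.ofList (t.map key)) (key x)
            = PySem.Set.ofList (t.map key) := by
          simp only [PySem.Set.add, PySem.Set.contains]
          simp [hk]
        rw [insertBy_flatMap_mem key x _ hf _
          (sorted_rev_ofList_pairwise_gt (t.map key))
          ((mem_sorted_rev_ofList (t.map key) (key x)).mpr (by
            simpa [PySem.Set.mem_ofList] using hk))]
        rw [hofl, hadd]
        exact List.flatMap_congr (fun c _ => (hbuckets c).symm)
      · have hadd : PySem.Set.add (PySem.Set.ofList (t.map key)) (key x)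
            = PySem.Set.ofList (t.map key) ++ [key x] := by
          simp only [PySem.Set.add, PySem.Set.contains]
          simp [hk]
        have hf0 : t.filter (fun p => key p == key x) = [] := by
          rw [List.filter_eq_nil_iff]
          intro p hp hpx
          exact hk (by
            rw [PySem.Set.mem_ofList]
            exact (by simpa using hpx) ▸ List.mem_map_of_mem hp)
        rw [insertBy_flatMap_not_mem key x _ hf hf0 _
          (sorted_rev_ofList_pairwise_gt (t.map key))
          (fun h => hk (by simpa [PySem.Set.mem_ofList] using
            (mem_sorted_rev_ofList (t.map key) (key x)).mp h))]
        rw [hofl, hadd, ← sorted_rev_concat (fun c => c)]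
        exact List.flatMap_congr (fun c _ => (hbuckets c).symm)

-- A's port computes the keys of the sorted items (given unique subject keys)
theorem portA_eq (l : List (String × Int)) (subjects : List String)
    (hnd : (l.map Prod.fst).Nodup) :
    find_subject_placement_priority l subjects
      = (PySem.List.sorted l (fun x => x.2) true).map Prod.fst := by
  unfold find_subject_placement_priority
  have hperm := PySem.List.sorted_perm l (fun x => x.2) true
  have hnd' : ((PySem.List.sorted l (fun x => x.2) true).map Prod.fst).Nodup :=
    ((hperm.map Prod.fst).nodup_iff).mpr hnd
  have hitems := PySem.Dict.items_foldl_insert_fresh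
    (PySem.List.sorted l (fun x => x.2) true) Prod.fst Prod.snd PySem.Dict.empty
    (fun a _ => PySem.Dict.contains_empty _) hnd'
  simp only [PySem.Dict.ofList, PySem.Dict.update]
  rw [PySem.List.foldl_append_singleton_eq_self]
  simp only [PySem.Dict.keys, hitems]
  have hemp : (PySem.Dict.empty : PySem.Dict String Int).items = [] := rfl
  simp [hemp]

-- B's port computes the descending-count bucket concatenation
theorem portB_eq (l : List (String × Int)) (subjects : List String) :
    find_subject_placement_priority_alt l subjects
      = (PySem.List.sorted (PySem.Set.ofList (l.map (fun p => p.2))) (fun c => c) true).flatMap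
          (fun c => (l.filter (fun p => p.2 == c)).map Prod.fst) := by
  unfold find_subject_placement_priority_alt
  have hfold : l.foldl (fun d p => d.modify p.2 ([] : List String) (fun xs => xs ++ [p.1]))
        PySem.Dict.empty
      = (l.map Prod.swap).foldl (fun d q => d.modify q.1 ([] : List String) (fun xs => xs ++ [q.2]))
        PySem.Dict.empty := by
    rw [List.foldl_map]
    rfl
  have hkeys : (l.foldl (fun d p => d.modify p.2 ([] : List String) (fun xs => xs ++ [p.1]))
        PySem.Dict.empty).keys = PySem.Set.ofList (l.map (fun p => p.2)) := by
    rw [PySem.Dict.keys_foldl_modify_key l (fun p => p.2) ([] : List String)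
      (fun _ p xs => xs ++ [p.1]) PySem.Dict.empty]
    simp [PySem.Dict.keys_empty, PySem.Set.update, PySem.Set.ofList]
  have hgetD : ∀ c : Int, (l.foldl (fun d p => d.modify p.2 ([] : List String)
        (fun xs => xs ++ [p.1])) PySem.Dict.empty).getD c []
      = (l.filter (fun p => p.2 == c)).map Prod.fst := by
    intro c
    rw [hfold, PySem.Dict.getD_foldl_modify_append]
    simp [List.filter_map, List.map_map, Function.comp_def]
  rw [PySem.List.foldl_append_eq_flatMap, hkeys]
  simp only [List.nil_append]
  exact List.flatMap_congr (fun c _ => by rw [hgetD c])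

-- ===== VERDICT (by name: the statement is the Claim_ definition above) =====
theorem find_subject_placement_priority_spec : Claim_equal_find_subject_placement_priority := by
  intro l subjects _ hpre
  unfold Spec_find_subject_placement_priority
  rw [portA_eq l subjects hpre, portB_eq l subjects,
    sorted_rev_eq_flatMap_buckets (fun p => p.2) l, List.map_flatMap]
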